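-- pv_equiv track=rewrite | github.com/Pragya28/Competitive-Programming | 07-set_kth_digit-Python/set_kth_digit.py | fun_set_kth_digit
-- ===== SOURCE A (Python) =====
-- def fun_set_kth_digit(n, k, d):
-- 	flag = (n == abs(n))
-- 	n = abs(n)
-- 	i = 0
-- 	x = 0
-- 	for i in range(k):
-- 		dig = n % 10
-- 		n //= 10
-- 		x = dig * 10 ** i + x
-- 	n //= 10
-- 	n = n * 10 ** (k+1) + d * 10 ** k + x
-- 	if flag:
-- 		return n
-- 	else:
-- 		return -n
-- ===== SOURCE B (Python) =====
-- def fun_set_kth_digit(n, k, d):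
--     s = -1 if n < 0 else 1
--     m = abs(n)
--     p = 10 ** k
--     return s * ((m // (10 * p)) * (10 * p) + d * p + m % p)
-- ===== Notes on version B (the rewrite author's own statement) =====
-- stated objective: faster
-- what changed: replaces the O(k) digit-extraction loop by O(1)-operation modular arithmetic: split abs(n) into quotient by 10^(k+1) and remainder mod 10^k and recombine with d*10^k
-- outside the precondition, e.g. on fun_set_kth_digit(123, -1, 5): A returns 12.5, B returns 123.6
import Mathlib
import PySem

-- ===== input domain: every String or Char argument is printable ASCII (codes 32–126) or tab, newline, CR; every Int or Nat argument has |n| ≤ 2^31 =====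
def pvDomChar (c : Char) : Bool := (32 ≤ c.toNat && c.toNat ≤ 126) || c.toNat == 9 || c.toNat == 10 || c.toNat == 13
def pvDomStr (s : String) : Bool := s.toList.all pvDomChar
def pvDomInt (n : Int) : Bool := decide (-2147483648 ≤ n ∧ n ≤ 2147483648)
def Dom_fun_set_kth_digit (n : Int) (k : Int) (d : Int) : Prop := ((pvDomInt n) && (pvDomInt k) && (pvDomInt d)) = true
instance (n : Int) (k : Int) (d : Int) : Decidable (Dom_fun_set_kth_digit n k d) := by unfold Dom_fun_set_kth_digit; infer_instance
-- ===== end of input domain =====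

-- B replaces A's O(k) digit-extraction loop by O(1) modular arithmetic (split by 10^(k+1) and 10^k, recombine with d*10^k); equivalence is about the return value.

-- ===== PORT A =====
def fun_set_kth_digit (n : Int) (k : Int) (d : Int) : Int :=
  let flag := n == |n|
  let n1 := |n|
  let st := (PySem.List.pyRange 0 k 1).foldl
    (fun (st : Int × Int) i =>
      let dig := PySem.Int.mod st.1 10
      let n' := PySem.Int.floordiv st.1 10
      (n', dig * 10 ^ i.toNat + st.2)) (n1, 0)
  let n2 := PySem.Int.floordiv st.1 10
  let n3 := n2 * 10 ^ (k+1).toNat + d * 10 ^ k.toNat + st.2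
  if flag then n3 else -n3

-- ===== PORT B =====
def fun_set_kth_digit_alt (n : Int) (k : Int) (d : Int) : Int :=
  let s : Int := if n < 0 then -1 else 1
  let m := |n|
  let p : Int := 10 ^ k.toNat
  s * (PySem.Int.floordiv m (10 * p) * (10 * p) + d * p + PySem.Int.mod m p)

-- ===== PRECONDITION & SPEC =====
-- Pre_ excludes k < 0, on which Python's 10 ** k is a float, so A returns a float, not an int.
def Pre_fun_set_kth_digit (n : Int) (k : Int) (d : Int) : Prop := 0 ≤ k
instance (n : Int) (k : Int) (d : Int) : Decidable (Pre_fun_set_kth_digit n k d) := by unfold Pre_fun_set_kth_digit; infer_instance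
def pvWitness_fun_set_kth_digit : Int × Int × Int := (829, 1, 7)

def Spec_fun_set_kth_digit (n : Int) (k : Int) (d : Int) (out : Int) : Prop := out = fun_set_kth_digit_alt n k d
instance (n : Int) (k : Int) (d : Int) (out : Int) : Decidable (Spec_fun_set_kth_digit n k d out) := by unfold Spec_fun_set_kth_digit; infer_instance

-- ===== CLAIM (what is proved, stated in full; the proofs are below) =====
def Claim_equal_fun_set_kth_digit : Prop := ∀ (n : Int) (k : Int) (d : Int), Dom_fun_set_kth_digit n k d → Pre_fun_set_kth_digit n k d → Spec_fun_set_kth_digit n k d (fun_set_kth_digit n k d)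

-- ===== LEMMAS AND PROOFS =====

-- A's loop over range(k), started at (m, 0), computes (m / 10^k, m % 10^k).
lemma pv_loop_inv (j : ℕ) (m : Int) :
    (PySem.List.pyRange 0 (j : Int) 1).foldl
      (fun (st : Int × Int) i =>
        let dig := PySem.Int.mod st.1 10
        let n' := PySem.Int.floordiv st.1 10
        (n', dig * 10 ^ i.toNat + st.2)) (m, 0)
    = (m / 10 ^ j, m % 10 ^ j) := by
  induction j with
  | zero => simp
  | succ j ih =>
    rw [show ((j + 1 : ℕ) : Int) = (j : Int) + 1 by push_cast; ring,
        PySem.List.pyRange_one_succ_right (by positivity),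
        List.foldl_append, ih]
    simp only [List.foldl]
    rw [PySem.Int.floordiv_eq_ediv_of_pos (by norm_num),
        PySem.Int.mod_eq_emod_of_pos (by norm_num)]
    have h1 := Int.emod_add_ediv m (10 ^ j)
    have h2 := Int.emod_add_ediv (m / 10 ^ j) 10
    have h3 : m / 10 ^ (j + 1) = m / 10 ^ j / 10 := by
      rw [pow_succ, Int.ediv_ediv_of_nonneg (by positivity)]
    have h4 := Int.emod_add_ediv m (10 ^ (j + 1))
    refine Prod.ext ?_ ?_
    · simpa [Int.toNat_natCast] using h3.symm
    · simp only [Int.toNat_natCast]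
      linear_combination (10 : ℤ) ^ j * h2 + h1 - h4 + (10 : ℤ) ^ (j + 1) * h3

-- ===== VERDICT (by name: the statement is the Claim_ definition above) =====
theorem fun_set_kth_digit_spec : Claim_equal_fun_set_kth_digit := by
  intro n k d _ hk
  obtain ⟨j, rfl⟩ : ∃ j : ℕ, k = (j : Int) := ⟨k.toNat, (Int.toNat_of_nonneg hk).symm⟩
  unfold Spec_fun_set_kth_digit fun_set_kth_digit fun_set_kth_digit_alt
  simp only [pv_loop_inv j |n|]
  have hpos : (0 : ℤ) < 10 * 10 ^ j := by positivity
  have hcast : ((j : Int) + 1).toNat = j + 1 := by omega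
  simp only [hcast, Int.toNat_natCast]
  rw [PySem.Int.floordiv_eq_ediv_of_pos (show (0:ℤ) < 10 by norm_num),
      PySem.Int.floordiv_eq_ediv_of_pos hpos,
      PySem.Int.mod_eq_emod_of_pos (by positivity)]
  have hq : |n| / 10 ^ j / 10 = |n| / (10 * 10 ^ j) := by
    rw [Int.ediv_ediv_of_nonneg (by positivity), mul_comm]
  rw [hq]
  by_cases hn : n < 0
  · have hflag : (n == |n|) = false := by
      simp only [beq_eq_false_iff_ne, ne_eq]
      intro h; have := abs_nonneg n; omega
    simp only [hflag, Bool.false_eq_true, if_false, if_pos hn]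
    ring
  · have hflag : (n == |n|) = true := by
      simp only [beq_iff_eq]
      exact (abs_of_nonneg (by omega)).symm
    simp only [hflag, if_true, if_neg hn]
    ring
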